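-- pv_equiv track=rewrite | github.com/FountainBule/python-study | word_manip.py | comb_word
-- ===== SOURCE A (Python) =====
-- def if_terminator(str_word):
--     """terminator detective
--     input string
--     output Bool
--     """
--     if '.' in str_word :
--         return True
--     if '!' in str_word :
--         return True
--     if '?' in str_word :
--         return True
--     return False
--
-- def comb_word(list_in):
--     """
--         reveres the effect of sep_words
--         input list
--         output string
--     """
--     stream = ''
--     curr_list = []
--     sbu = []
--     for curr_list in list_in:
--         for sub in curr_list:
--             #there is no space in front of terminator
--             if if_terminator(sub):
--                 stream = stream[:-1]
--             stream = stream + (str(sub))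
--             stream += ' '
--     return stream
-- ===== SOURCE B (Python) =====
-- def if_terminator(str_word):
--     """terminator detective
--     input string
--     output Bool
--     """
--     if '.' in str_word :
--         return True
--     if '!' in str_word :
--         return True
--     if '?' in str_word :
--         return True
--     return False
--
-- def comb_word(list_in):
--     """
--         reveres the effect of sep_words
--         input list
--         output string
--     """
--     words = [w for curr_list in list_in for w in curr_list]
--     parts = []
--     for i, w in enumerate(words):
--         if i > 0 and not if_terminator(w):
--             parts.append(' ')
--         parts.append(str(w))
--     if parts:
--         parts.append(' ')
--     return ''.join(parts)
-- ===== Notes on version B (the rewrite author's own statement) =====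
-- stated objective: simpler
-- what changed: B flattens the nested lists once and decides the separator before each word (space only when i>0 and the word is not a terminator), collecting fragments and joining them, instead of A's append-a-space-then-backtrack via stream[:-1].
import Mathlib
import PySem

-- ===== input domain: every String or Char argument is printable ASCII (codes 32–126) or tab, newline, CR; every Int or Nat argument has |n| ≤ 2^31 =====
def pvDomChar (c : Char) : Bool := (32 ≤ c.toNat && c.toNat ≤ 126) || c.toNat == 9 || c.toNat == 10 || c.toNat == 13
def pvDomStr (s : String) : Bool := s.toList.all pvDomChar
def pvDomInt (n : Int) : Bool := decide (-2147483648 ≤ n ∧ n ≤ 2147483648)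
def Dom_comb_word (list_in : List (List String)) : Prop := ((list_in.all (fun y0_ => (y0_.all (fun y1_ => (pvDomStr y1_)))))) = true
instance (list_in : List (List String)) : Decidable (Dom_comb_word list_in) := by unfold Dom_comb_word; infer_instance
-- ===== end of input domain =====

-- B flattens once and decides the separator up front instead of A's append-then-backtrack via stream[:-1]; objective: simpler.

-- ===== PORT A =====
def if_terminator_port (str_word : String) : Bool :=
  if PySem.Str.isIn "." str_word then true
  else if PySem.Str.isIn "!" str_word then true
  else if PySem.Str.isIn "?" str_word then true
  else false

def comb_word (list_in : List (List String)) : String :=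
  list_in.foldl (fun stream curr_list =>
    curr_list.foldl (fun stream sub =>
      let stream := if if_terminator_port sub then PySem.Str.slice stream none (some (-1)) else stream
      let stream := stream ++ sub   -- str(sub) of a string is the string itself
      stream ++ " ") stream) ""

-- ===== PORT B =====
def comb_word_alt (list_in : List (List String)) : String :=
  let words := list_in.flatMap (fun curr_list => curr_list)
  let parts := (PySem.List.enumerate words).foldl (fun parts iw =>
      let parts := if decide (0 < iw.1) && !if_terminator_port iw.2 then parts ++ [" "] else parts
      parts ++ [iw.2]) []   -- parts.append(str(w)); str(w) of a string is the string itself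
  let parts := if parts.isEmpty then parts else parts ++ [" "]
  PySem.Str.join "" parts

-- ===== PRECONDITION & SPEC =====
def Spec_comb_word (list_in : List (List String)) (out : String) : Prop := out = comb_word_alt list_in
instance (list_in : List (List String)) (out : String) : Decidable (Spec_comb_word list_in out) := by unfold Spec_comb_word; infer_instance

-- ===== CLAIM (what is proved, stated in full; the proofs are below) =====
def Claim_equal_comb_word : Prop := ∀ (list_in : List (List String)), Dom_comb_word list_in → Spec_comb_word list_in (comb_word list_in)

-- ===== LEMMAS AND PROOFS =====

-- A's inner loop step, on the List Char side
def charStepA (cs : List Char) (w : String) : List Char :=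
  (if if_terminator_port w then cs.dropLast else cs) ++ w.toList ++ [' ']

-- the separator-then-word fragment both programs produce for every word after the first
def frag (w : String) : List Char :=
  (if if_terminator_port w then [] else [' ']) ++ w.toList

theorem strFoldA_toList (ws : List String) (s : String) :
    (ws.foldl (fun stream sub =>
      let stream := if if_terminator_port sub then PySem.Str.slice stream none (some (-1)) else stream
      let stream := stream ++ sub
      stream ++ " ") s).toList = ws.foldl charStepA s.toList := by
  induction ws generalizing s with
  | nil => rfl
  | cons w t ih =>
      simp only [List.foldl_cons, ih, charStepA]
      congr 1
      split
      · simp only [String.toList_append]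
        congr 2
        simpa using PySem.Str.slice_to_neg_one s
      · simp [String.toList_append]

theorem charFoldA_eq (ws : List String) :
    ws.foldl charStepA [] =
      (match ws with
       | [] => []
       | w :: rest => w.toList ++ rest.flatMap frag ++ [' ']) := by
  induction ws using List.reverseRecOn with
  | nil => rfl
  | append_singleton t w ih =>
      rw [List.foldl_append]
      cases t with
      | nil => simp [charStepA]
      | cons a r =>
          simp only at ih
          simp only [List.foldl_cons] at ih ⊢
          rw [ih, charStepA]
          by_cases h : if_terminator_port w = true <;>
            simp [h, frag, List.flatMap_append]

theorem enumFoldB (ws : List String) : ∀ (acc : List String) (s : Int), 1 ≤ s →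
    (PySem.List.enumerate ws s).foldl (fun parts iw =>
        let parts := if decide (0 < iw.1) && !if_terminator_port iw.2 then parts ++ [" "] else parts
        parts ++ [iw.2]) acc
      = acc ++ ws.flatMap (fun v => (if if_terminator_port v then [] else [" "]) ++ [v]) := by
  induction ws with
  | nil => intro acc s _; simp [PySem.List.enumerate]
  | cons w t ih =>
      intro acc s hs
      rw [PySem.List.enumerate_cons, List.foldl_cons]
      rw [ih _ (s + 1) (by omega)]
      have h0 : decide (0 < s) = true := by simpa using (by omega : (0:Int) < s)
      by_cases h : if_terminator_port w = true <;> simp [h, h0]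

theorem join_empty_sep (cs : List (List Char)) : PySem.Chars.join [] cs = cs.flatten := by
  induction cs with
  | nil => rfl
  | cons a t ih => cases t <;> simp_all [PySem.Chars.join, List.intercalate, List.intersperse]

theorem A_toList (list_in : List (List String)) :
    (comb_word list_in).toList =
      (match list_in.flatten with
       | [] => []
       | w :: rest => w.toList ++ rest.flatMap frag ++ [' ']) := by
  unfold comb_word
  rw [← List.foldl_flatten, strFoldA_toList, show ("" : String).toList = [] from rfl,
    charFoldA_eq]

theorem fragJoin (rest : List String) :
    ((rest.flatMap (fun v => (if if_terminator_port v then [] else [" "]) ++ [v])).map String.toList).flatten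
      = rest.flatMap frag := by
  induction rest with
  | nil => rfl
  | cons v t ih => by_cases h : if_terminator_port v = true <;> simp [h, frag, ih]

theorem B_toList (list_in : List (List String)) :
    (comb_word_alt list_in).toList =
      (match list_in.flatten with
       | [] => []
       | w :: rest => w.toList ++ rest.flatMap frag ++ [' ']) := by
  simp only [comb_word_alt]
  rw [show list_in.flatMap (fun curr_list => curr_list) = list_in.flatten from List.flatMap_id ..]
  cases hws : list_in.flatten with
  | nil => simp [PySem.List.enumerate, PySem.Str.join, PySem.Chars.join, List.intercalate]
  | cons w rest =>
      rw [PySem.List.enumerate, List.foldl_cons]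
      simp only [lt_irrefl, decide_false, Bool.false_and, Bool.false_eq_true, if_false,
        List.nil_append]
      rw [enumFoldB rest [w] (0 + 1) (by omega)]
      have hne : ¬ (([w] ++ rest.flatMap (fun v => (if if_terminator_port v then [] else [" "]) ++ [v])).isEmpty = true) := by
        simp
      rw [if_neg hne]
      simp only [PySem.Str.join]
      rw [show ("" : String).toList = [] from rfl, join_empty_sep, String.toList_ofList]
      simp only [List.map_append, List.flatten_append, List.map_cons, List.map_nil,
        List.flatten_cons, List.flatten_nil, List.append_nil]
      rw [fragJoin]
      rfl

-- ===== VERDICT (by name: the statement is the Claim_ definition above) =====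
theorem comb_word_spec : Claim_equal_comb_word := by
  intro list_in _
  unfold Spec_comb_word
  exact String.toList_inj.mp ((A_toList list_in).trans (B_toList list_in).symm)
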